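-- pv_equiv track=rewrite | github.com/themohitkarn/Neuraforge | vector_store/vector_index.py | chunk_generic_text
-- ===== SOURCE A (Python) =====
-- from typing import List, Dict, Any
--
-- def chunk_generic_text(text: str, file_path: str, chunk_size=500) -> List[Dict[str, Any]]:
--     """Simple line-based chunker for non-python files."""
--     lines = text.split('\n')
--     chunks = []
--     current_chunk = []
--     current_len = 0
--
--     for i, line in enumerate(lines):
--         current_chunk.append(line)
--         current_len += len(line)
--
--         if current_len >= chunk_size or i == len(lines) - 1:
--             chunks.append({
--                 "file_path": file_path,
--                 "type": "TextChunk",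
--                 "name": f"Lines {i - len(current_chunk) + 1}-{i}",
--                 "content": '\n'.join(current_chunk)
--             })
--             current_chunk = []
--             current_len = 0
--
--     if not chunks:
--         chunks.append({
--             "file_path": file_path,
--             "type": "Empty",
--             "name": "Empty",
--             "content": ""
--         })
--     return chunks
-- ===== SOURCE B (Python) =====
-- from typing import List, Dict, Any
--
-- def chunk_generic_text(text: str, file_path: str, chunk_size=500) -> List[Dict[str, Any]]:
--     """Two-pass line-based chunker: first record (start, end) line ranges, then format."""
--     lines = text.split('\n')
--     ranges = []
--     start = 0
--     total = 0
--     for i, line in enumerate(lines):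
--         total += len(line)
--         if total >= chunk_size or i == len(lines) - 1:
--             ranges.append((start, i))
--             start = i + 1
--             total = 0
--     return [{
--         "file_path": file_path,
--         "type": "TextChunk",
--         "name": f"Lines {s}-{e}",
--         "content": '\n'.join(lines[s:e + 1]),
--     } for (s, e) in ranges]
-- ===== Notes on version B (the rewrite author's own statement) =====
-- stated objective: alternative
-- what changed: B splits the work into two passes: a first pass over the lines that only records (start, end) chunk ranges, and a second pass that maps each range to its formatted dict (name from the range, content re-sliced from the line list), instead of A's single loop that accumulates lines and emits fully formatted dicts inline; B also drops A's unreachable 'Empty' fallback since split always yields at least one line.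
import Mathlib
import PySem

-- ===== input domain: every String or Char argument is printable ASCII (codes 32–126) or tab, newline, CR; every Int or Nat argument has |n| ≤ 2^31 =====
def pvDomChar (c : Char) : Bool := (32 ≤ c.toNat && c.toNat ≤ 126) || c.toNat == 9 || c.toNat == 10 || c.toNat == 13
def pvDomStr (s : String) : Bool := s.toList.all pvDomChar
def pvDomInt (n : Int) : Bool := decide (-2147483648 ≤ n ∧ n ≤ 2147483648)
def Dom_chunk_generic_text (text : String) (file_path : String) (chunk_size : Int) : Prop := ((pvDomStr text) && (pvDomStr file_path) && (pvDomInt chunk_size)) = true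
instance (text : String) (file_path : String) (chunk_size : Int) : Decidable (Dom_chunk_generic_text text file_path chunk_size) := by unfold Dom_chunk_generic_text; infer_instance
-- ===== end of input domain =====

-- B separates the grouping decision (a pass recording (start,end) line ranges) from the dict
-- formatting (a map over the ranges); same asymptotic cost, different decomposition ("alternative").

-- ===== PORT A =====
-- loop body of A's single for-loop; state = (chunks, current_chunk, current_len)
def chunkA_step (file_path : String) (chunk_size : Int) (n : Nat)
    (st : List (List (String × String)) × List String × Int) (p : Int × String) :
    List (List (String × String)) × List String × Int :=
  let current_chunk := st.2.1 ++ [p.2]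
  let current_len := st.2.2 + PySem.Str.len p.2
  if current_len ≥ chunk_size ∨ p.1 = (n : Int) - 1 then
    (st.1 ++ [[("file_path", file_path), ("type", "TextChunk"),
       ("name", "Lines " ++ PySem.Int.toStr (p.1 - (current_chunk.length : Int) + 1)
                  ++ "-" ++ PySem.Int.toStr p.1),
       ("content", PySem.Str.join "\n" current_chunk)]], [], 0)
  else
    (st.1, current_chunk, current_len)

def chunk_generic_text (text : String) (file_path : String) (chunk_size : Int) :
    List (List (String × String)) :=
  -- text.split('\n'): sep is the non-empty "\n", so split? is always `some`
  let lines := (PySem.Str.split? text "\n").getD []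
  let st := (PySem.List.enumerate lines).foldl (chunkA_step file_path chunk_size lines.length) ([], [], 0)
  if st.1 = [] then
    [[("file_path", file_path), ("type", "Empty"), ("name", "Empty"), ("content", "")]]
  else st.1

-- ===== PORT B =====
-- first pass: record (start, end) ranges; state = (ranges, start, total)
def chunkB_step (chunk_size : Int) (n : Nat)
    (st : List (Int × Int) × Int × Int) (p : Int × String) : List (Int × Int) × Int × Int :=
  let total := st.2.2 + PySem.Str.len p.2
  if total ≥ chunk_size ∨ p.1 = (n : Int) - 1 then
    (st.1 ++ [(st.2.1, p.1)], p.1 + 1, 0)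
  else
    (st.1, st.2.1, total)

-- second pass: format one recorded range as a dict
def chunkB_fmt (lines : List String) (file_path : String) (r : Int × Int) :
    List (String × String) :=
  [("file_path", file_path), ("type", "TextChunk"),
   ("name", "Lines " ++ PySem.Int.toStr r.1 ++ "-" ++ PySem.Int.toStr r.2),
   ("content", PySem.Str.join "\n" (PySem.List.slice lines (some r.1) (some (r.2 + 1))))]

def chunk_generic_text_alt (text : String) (file_path : String) (chunk_size : Int) :
    List (List (String × String)) :=
  let lines := (PySem.Str.split? text "\n").getD []
  let rs := ((PySem.List.enumerate lines).foldl (chunkB_step chunk_size lines.length) ([], 0, 0)).1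
  rs.map (chunkB_fmt lines file_path)

-- ===== PRECONDITION & SPEC =====
def Spec_chunk_generic_text (text : String) (file_path : String) (chunk_size : Int) (out : List (List (String × String))) : Prop := out = chunk_generic_text_alt text file_path chunk_size
instance (text : String) (file_path : String) (chunk_size : Int) (out : List (List (String × String))) : Decidable (Spec_chunk_generic_text text file_path chunk_size out) := by unfold Spec_chunk_generic_text; infer_instance

-- ===== CLAIM (what is proved, stated in full; the proofs are below) =====
def Claim_equal_chunk_generic_text : Prop := ∀ (text : String) (file_path : String) (chunk_size : Int), Dom_chunk_generic_text text file_path chunk_size → Spec_chunk_generic_text text file_path chunk_size (chunk_generic_text text file_path chunk_size)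

-- ===== LEMMAS AND PROOFS =====

-- splitOn's worker never returns the empty list (both terminal cases cons onto acc)
lemma splitOn_go_ne_nil (sep : List Char) : ∀ (fuel : Nat) (l cur : List Char) (acc : List (List Char)),
    PySem.Chars.splitOn.go sep fuel l cur acc ≠ [] := by
  intro fuel
  induction fuel with
  | zero => intro l cur acc; simp [PySem.Chars.splitOn.go]
  | succ n ih =>
    intro l cur acc
    cases l with
    | nil => simp [PySem.Chars.splitOn.go]
    | cons c rest =>
      rw [PySem.Chars.splitOn.go]
      split
      · exact ih _ _ _
      · exact ih _ _ _

lemma lines_ne_nil (text : String) : (PySem.Str.split? text "\n").getD [] ≠ [] := by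
  simp only [PySem.Str.split?, PySem.Chars.split?, PySem.Chars.splitOn,
    show (("\n" : String).toList.isEmpty = true) = False by simp]
  simp only [if_false, Option.map_some, Option.getD_some, ne_eq, List.map_eq_nil_iff]
  exact splitOn_go_ne_nil _ _ _ _ _

-- the loop invariant: A's fold with chunks = rs.map fmt, cur = lines[start:k], len = total
-- mirrors B's fold with state (rs, start, total), where start = k - |cur|
lemma chunk_loop_eq (fp : String) (cs : Int) (lines : List String) :
    ∀ (rest : List String) (k : Nat) (cur : List String) (rs : List (Int × Int)) (total : Int),
      cur.length ≤ k →
      lines.drop (k - cur.length) = cur ++ rest →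
      ((PySem.List.enumerate rest (k : Int)).foldl (chunkA_step fp cs lines.length)
          (rs.map (chunkB_fmt lines fp), cur, total)).1
        = (((PySem.List.enumerate rest (k : Int)).foldl (chunkB_step cs lines.length)
            (rs, ((k : Int) - (cur.length : Int), total))).1).map (chunkB_fmt lines fp) := by
  intro rest
  induction rest with
  | nil => intro k cur rs total _ _; simp [PySem.List.enumerate_nil]
  | cons x rest ih =>
    intro k cur rs total h1 h2
    have hdropk : lines.drop k = x :: rest := by
      have := congrArg (List.drop cur.length) h2
      rwa [List.drop_drop, List.drop_append_of_le_length (le_refl _), List.drop_length,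
        List.nil_append, Nat.sub_add_cancel h1] at this
    have hgetk : lines[k]? = some x := by
      have := congrArg List.head? hdropk
      rwa [List.head?_drop] at this
    rw [PySem.List.enumerate_cons, List.foldl_cons, List.foldl_cons]
    by_cases hc : total + PySem.Str.len x ≥ cs ∨ (k : Int) = (lines.length : Int) - 1
    · have hB : chunkB_step cs lines.length (rs, ((k : Int) - (cur.length : Int), total)) ((k : Int), x)
          = (rs ++ [(((k : Int) - (cur.length : Int)), (k : Int))], (k : Int) + 1, 0) := by
        simp only [chunkB_step]; rw [if_pos hc]
      have hcontent : PySem.List.slice lines (some ((k : Int) - (cur.length : Int))) (some ((k : Int) + 1))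
          = cur ++ [x] := by
        have hs : ((k : Int) - (cur.length : Int)) = ((k - cur.length : Nat) : Int) := by omega
        have hb : ((k : Int) + 1) = ((k + 1 : Nat) : Int) := by push_cast; ring
        rw [hs, hb, PySem.List.slice_natCast, h2]
        have hlen : k + 1 - (k - cur.length) = cur.length + 1 := by omega
        rw [hlen, List.take_append]
        simp
      have hA : chunkA_step fp cs lines.length (rs.map (chunkB_fmt lines fp), cur, total) ((k : Int), x)
          = ((rs ++ [(((k : Int) - (cur.length : Int)), (k : Int))]).map (chunkB_fmt lines fp), [], 0) := by
        simp only [chunkA_step]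
        rw [if_pos (by simpa using hc)]
        simp only [chunkB_fmt, List.map_append, List.map_cons, List.map_nil, hcontent]
        have hname : (k : Int) - (((cur ++ [x]).length : Nat) : Int) + 1 = (k : Int) - (cur.length : Int) := by
          simp; omega
        rw [hname]
      rw [hA, hB]
      have h2' : lines.drop ((k + 1) - ([] : List String).length) = [] ++ rest := by
        simpa using congrArg List.tail hdropk
      have := ih (k + 1) [] (rs ++ [(((k : Int) - (cur.length : Int)), (k : Int))]) 0 (by simp) h2'
      simp only [List.length_nil, Nat.cast_zero, Nat.cast_add, Nat.cast_one, Int.sub_zero] at this ⊢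
      exact this
    · have hB : chunkB_step cs lines.length (rs, ((k : Int) - (cur.length : Int), total)) ((k : Int), x)
          = (rs, ((k : Int) - (cur.length : Int), total + PySem.Str.len x)) := by
        simp only [chunkB_step]; rw [if_neg hc]
      have hA : chunkA_step fp cs lines.length (rs.map (chunkB_fmt lines fp), cur, total) ((k : Int), x)
          = (rs.map (chunkB_fmt lines fp), cur ++ [x], total + PySem.Str.len x) := by
        simp only [chunkA_step]
        rw [if_neg (by simpa using hc)]
      rw [hA, hB]
      have h1' : (cur ++ [x]).length ≤ k + 1 := by simpa using Nat.add_le_add_right h1 1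
      have h2' : lines.drop ((k + 1) - (cur ++ [x]).length) = (cur ++ [x]) ++ rest := by
        have heq : (k + 1) - (cur ++ [x]).length = k - cur.length := by
          simp only [List.length_append, List.length_cons, List.length_nil]; omega
        rw [heq, h2]; simp
      have := ih (k + 1) (cur ++ [x]) rs (total + PySem.Str.len x) h1' h2'
      have hst : ((k : Int) + 1) - (((cur ++ [x]).length : Nat) : Int) = (k : Int) - (cur.length : Int) := by
        simp only [List.length_append, List.length_cons, List.length_nil]; omega
      simp only [Nat.cast_add, Nat.cast_one, hst] at this
      exact this

-- the last line's index is n-1, so at least one range is always recorded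
lemma chunkB_rs_ne_nil (cs : Int) (n : Nat) :
    ∀ (rest : List String) (k : Nat) (st : List (Int × Int) × Int × Int),
      rest ≠ [] → k + rest.length = n →
      ((PySem.List.enumerate rest (k : Int)).foldl (chunkB_step cs n) st).1 ≠ [] := by
  intro rest
  induction rest with
  | nil => intro _ _ h _; exact absurd rfl h
  | cons x rest ih =>
    intro k st _ hn
    rw [PySem.List.enumerate_cons, List.foldl_cons]
    cases rest with
    | nil =>
      simp only [PySem.List.enumerate_nil, List.foldl_nil]
      have hk : (k : Int) = (n : Int) - 1 := by simp at hn; omega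
      simp [chunkB_step, hk]
    | cons y rest' =>
      have := ih (k + 1) (chunkB_step cs n st ((k : Int), x)) (by simp) (by simp at hn ⊢; omega)
      simpa using this

-- ===== VERDICT (by name: the statement is the Claim_ definition above) =====
theorem chunk_generic_text_spec : Claim_equal_chunk_generic_text := by
  intro text file_path chunk_size _
  simp only [Spec_chunk_generic_text, chunk_generic_text, chunk_generic_text_alt]
  have hmain := chunk_loop_eq file_path chunk_size ((PySem.Str.split? text "\n").getD [])
    ((PySem.Str.split? text "\n").getD []) 0 [] [] 0 (by simp) (by simp)
  simp only [List.map_nil, List.length_nil, Nat.cast_zero, Int.sub_zero] at hmain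
  have hne := chunkB_rs_ne_nil chunk_size ((PySem.Str.split? text "\n").getD []).length
    ((PySem.Str.split? text "\n").getD []) 0 ([], 0, 0) (lines_ne_nil text) (by simp)
  simp only [Nat.cast_zero] at hne
  rw [hmain, if_neg (by simpa using hne)]
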